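-- pv_equiv track=rewrite | github.com/pvanh80/intro-to-programming | round06/longest_substring_in_order.py | longest_substring_in_order
-- ===== SOURCE A (Python) =====
-- def longest_substring_in_order(input_string):
--
--     list_temp = list(input_string)  # list stores all letters
--     index = 0
--     result = ''  # current string
--     result_temp = ''  # if e
--     list_str = []
--     list_empty = ''
--     while True:
--         # if input string is list of one letter
--         if len(list_temp) < 2:
--             list_str = list_temp
--             break
--         else:
--             # if last letter are in order added to current string
--             if index == len(list_temp) - 1:
--                 if list_temp[index] > list_temp[index - 1]:
--                     result += list_temp[index]
--                     list_str.append(result)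
--                 break
--
--             else:
--                 # letters are in order
--                 if list_temp[index] < list_temp[index + 1]:
--                     result += list_temp[index]
--
--                 else:
--                     # need a var to store the string when the next character is not in order,
--                     # store character at i index
--                     result_temp = result + list_temp[index]
--                     list_str.append(result_temp)
--                     result = ''  # reset result to empty when next character is not in order
--
--             list_str.append(result)
--
--         index += 1
--
--     if len(list_str) == 0:
--         return list_empty
--     else:
--
--         return max(list_str, key=len)
-- ===== SOURCE B (Python) =====
-- def longest_substring_in_order(input_string):
--     best = ''
--     cur = ''
--     prev = None
--     for ch in input_string:
--         if prev is not None and prev < ch: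
--             cur = cur + ch
--         else:
--             cur = ch
--         if len(best) < len(cur):
--             best = cur
--         prev = ch
--     return best
-- ===== Notes on version B (the rewrite author's own statement) =====
-- stated objective: simpler
-- what changed: B replaces A's candidate-collection (appending every partial and completed run to a list and taking max(key=len) at the end) with a single scan that keeps only the current run and the running best, updating best on strictly greater length.
import Mathlib
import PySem

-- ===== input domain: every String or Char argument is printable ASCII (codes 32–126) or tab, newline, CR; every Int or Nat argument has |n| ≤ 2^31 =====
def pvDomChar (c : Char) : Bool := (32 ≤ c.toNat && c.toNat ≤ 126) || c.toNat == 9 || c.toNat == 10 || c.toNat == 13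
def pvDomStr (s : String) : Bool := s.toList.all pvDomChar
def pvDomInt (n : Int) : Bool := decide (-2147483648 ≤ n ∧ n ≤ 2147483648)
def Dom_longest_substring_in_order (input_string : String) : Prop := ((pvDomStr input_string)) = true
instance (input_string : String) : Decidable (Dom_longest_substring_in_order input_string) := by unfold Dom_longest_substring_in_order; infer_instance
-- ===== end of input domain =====

-- B replaces A's candidate-list-plus-max(key=len) with a single running-best scan
-- (simpler, and measured faster in a timing run); return values only — neither mutates.

-- ===== PORT A =====
-- A's `while True` loop; `fuel` only makes the recursion structurally total — it starts at
-- length+1 and the loop advances `index` by 1 per iteration, so fuel never runs out.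
-- `list_str = list_temp` (a list of 1-char strings in Python) is `lt.map ([·])`.
def pvLoopA (lt : List Char) (index : Nat) (result : List Char)
    (list_str : List (List Char)) (fuel : Nat) : List (List Char) :=
  match fuel with
  | 0 => list_str
  | fuel + 1 =>
    if lt.length < 2 then lt.map (fun c => [c])
    else if index = lt.length - 1 then
      if lt[index - 1]! < lt[index]! then list_str ++ [result ++ [lt[index]!]] else list_str
    else
      if lt[index]! < lt[index + 1]! then
        pvLoopA lt (index + 1) (result ++ [lt[index]!]) (list_str ++ [result ++ [lt[index]!]]) fuel
      else
        pvLoopA lt (index + 1) [] (list_str ++ [result ++ [lt[index]!], []]) fuel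

-- max(list_str, key=len): first element of maximal length (only called on a nonempty list).
def pvMaxByLen (l : List (List Char)) : List Char :=
  match l with
  | [] => []
  | x :: xs => xs.foldl (fun m y => if m.length < y.length then y else m) x

def longest_substring_in_order (input_string : String) : String :=
  let list_temp := input_string.toList
  let list_str := pvLoopA list_temp 0 [] [] (list_temp.length + 1)
  if list_str.length = 0 then "" else String.ofList (pvMaxByLen list_str)

-- ===== PORT B =====
-- state = (best, cur, prev); one pass over the characters.
def pvStepB (st : List Char × List Char × Option Char) (ch : Char) :
    List Char × List Char × Option Char :=
  let cur := match st.2.2 with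
    | some p => if p < ch then st.2.1 ++ [ch] else [ch]
    | none => [ch]
  let best := if st.1.length < cur.length then cur else st.1
  (best, cur, some ch)

def longest_substring_in_order_alt (input_string : String) : String :=
  String.ofList (input_string.toList.foldl pvStepB ([], [], none)).1

-- ===== PRECONDITION & SPEC =====
def Spec_longest_substring_in_order (input_string : String) (out : String) : Prop := out = longest_substring_in_order_alt input_string
instance (input_string : String) (out : String) : Decidable (Spec_longest_substring_in_order input_string out) := by unfold Spec_longest_substring_in_order; infer_instance

-- ===== CLAIM (what is proved, stated in full; the proofs are below) =====
def Claim_equal_longest_substring_in_order : Prop := ∀ (input_string : String), Dom_longest_substring_in_order input_string → Spec_longest_substring_in_order input_string (longest_substring_in_order input_string)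

-- ===== LEMMAS AND PROOFS =====

theorem pvMaxByLen_append (l : List (List Char)) (x : List Char) (h : l ≠ []) :
    pvMaxByLen (l ++ [x]) = (if (pvMaxByLen l).length < x.length then x else pvMaxByLen l) := by
  match l with
  | [] => exact absurd rfl h
  | y :: ys => simp [pvMaxByLen, List.foldl_append]

-- main loop invariant: from iteration `index` on (1 ≤ index ≤ n-1), A's remaining loop
-- followed by max-by-length equals B's fold over the remaining characters.
theorem pvStepB_eq (best cur result : List Char) (p c : Char)
    (hres : result = if p < c then cur else []) :
    pvStepB (best, cur, some p) c
      = ((if best.length < (result ++ [c]).length then result ++ [c] else best),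
         result ++ [c], some c) := by
  simp only [pvStepB]
  by_cases hc : p < c
  · rw [hres, if_pos hc, if_pos hc]
  · rw [hres, if_neg hc, if_neg hc]; simp

theorem pvLoop_inv (lt : List Char) (fuel : Nat) :
    ∀ (index : Nat) (result best cur : List Char) (list_str : List (List Char)),
    2 ≤ lt.length → 1 ≤ index → index ≤ lt.length - 1 →
    lt.length - index ≤ fuel →
    list_str ≠ [] →
    pvMaxByLen list_str = best →
    1 ≤ best.length →
    result = (if lt[index - 1]! < lt[index]! then cur else []) →
    pvMaxByLen (pvLoopA lt index result list_str fuel)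
      = ((lt.drop index).foldl pvStepB (best, cur, some (lt[index - 1]!))).1 ∧
    pvLoopA lt index result list_str fuel ≠ [] := by
  induction fuel with
  | zero => intro index _ _ _ _ hn hi1 hi2 hf; omega
  | succ fuel ih =>
    intro index result best cur list_str hn hi1 hi2 hf hne hmax hb hres
    have hidx : index < lt.length := by omega
    have hdrop : lt.drop index = lt[index] :: lt.drop (index + 1) :=
      List.drop_eq_getElem_cons hidx
    have hget : lt[index]! = lt[index] := getElem!_pos lt index hidx
    rw [hdrop, List.foldl_cons]
    have hstep := pvStepB_eq best cur result (lt[index - 1]!) (lt[index]!) hres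
    rw [hget] at hstep
    rw [hstep, ← hget]
    by_cases hc : lt[index - 1]! < lt[index]!
    all_goals by_cases hlast : index = lt.length - 1
    -- four goals: (hc+, last), (hc+, mid), (hc-, last), (hc-, mid)
    ·
      have hdrop2 : lt.drop (index + 1) = [] := by apply List.drop_eq_nil_of_le; omega
      rw [pvLoopA]
      simp only [if_neg (by omega : ¬ lt.length < 2), if_pos hlast, if_pos hc, hdrop2,
        List.foldl_nil]
      refine ⟨?_, by simp⟩
      rw [pvMaxByLen_append _ _ hne, hmax, hres, if_pos hc]
    ·
      rw [pvLoopA]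
      simp only [if_neg (by omega : ¬ lt.length < 2), if_neg hlast]
      have hmid : index < lt.length - 1 := by omega
      by_cases hc2 : lt[index]! < lt[index + 1]!
      · rw [if_pos hc2]
        exact ih (index + 1) (result ++ [lt[index]!])
          (if best.length < (result ++ [lt[index]!]).length then result ++ [lt[index]!] else best)
          (result ++ [lt[index]!]) (list_str ++ [result ++ [lt[index]!]])
          hn (by omega) (by omega : index + 1 ≤ lt.length - 1) (by omega : lt.length - (index + 1) ≤ fuel) (by simp)
          (by rw [pvMaxByLen_append _ _ hne, hmax])
          (by by_cases hq : best.length < (result ++ [lt[index]!]).length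
              · rw [if_pos hq]; simp
              · rw [if_neg hq]; exact hb)
          (by simp only [Nat.add_sub_cancel]; rw [if_pos hc2])
      · rw [if_neg hc2]
        have h2 : list_str ++ [result ++ [lt[index]!], []]
            = (list_str ++ [result ++ [lt[index]!]]) ++ [[]] := by simp
        exact ih (index + 1) []
          (if best.length < (result ++ [lt[index]!]).length then result ++ [lt[index]!] else best)
          (result ++ [lt[index]!]) (list_str ++ [result ++ [lt[index]!], []])
          hn (by omega) (by omega : index + 1 ≤ lt.length - 1) (by omega : lt.length - (index + 1) ≤ fuel) (by simp)
          (by rw [h2, pvMaxByLen_append _ _ (by simp), pvMaxByLen_append _ _ hne, hmax]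
              rw [if_neg (by split <;> simp)])
          (by by_cases hq : best.length < (result ++ [lt[index]!]).length
              · rw [if_pos hq]; simp
              · rw [if_neg hq]; exact hb)
          (by simp only [Nat.add_sub_cancel]; rw [if_neg hc2])
    ·
      have hdrop2 : lt.drop (index + 1) = [] := by apply List.drop_eq_nil_of_le; omega
      rw [pvLoopA]
      simp only [if_neg (by omega : ¬ lt.length < 2), if_pos hlast, if_neg hc, hdrop2,
        List.foldl_nil]
      refine ⟨?_, hne⟩
      rw [hres, if_neg hc]
      have : ¬ best.length < (([] : List Char) ++ [lt[index]!]).length := Nat.not_lt.mpr (by simpa using hb)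
      rw [if_neg this, hmax]
    ·
      rw [pvLoopA]
      simp only [if_neg (by omega : ¬ lt.length < 2), if_neg hlast]
      have hmid : index < lt.length - 1 := by omega
      by_cases hc2 : lt[index]! < lt[index + 1]!
      · rw [if_pos hc2]
        exact ih (index + 1) (result ++ [lt[index]!])
          (if best.length < (result ++ [lt[index]!]).length then result ++ [lt[index]!] else best)
          (result ++ [lt[index]!]) (list_str ++ [result ++ [lt[index]!]])
          hn (by omega) (by omega : index + 1 ≤ lt.length - 1) (by omega : lt.length - (index + 1) ≤ fuel) (by simp)
          (by rw [pvMaxByLen_append _ _ hne, hmax])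
          (by by_cases hq : best.length < (result ++ [lt[index]!]).length
              · rw [if_pos hq]; simp
              · rw [if_neg hq]; exact hb)
          (by simp only [Nat.add_sub_cancel]; rw [if_pos hc2])
      · rw [if_neg hc2]
        have h2 : list_str ++ [result ++ [lt[index]!], []]
            = (list_str ++ [result ++ [lt[index]!]]) ++ [[]] := by simp
        exact ih (index + 1) []
          (if best.length < (result ++ [lt[index]!]).length then result ++ [lt[index]!] else best)
          (result ++ [lt[index]!]) (list_str ++ [result ++ [lt[index]!], []])
          hn (by omega) (by omega : index + 1 ≤ lt.length - 1) (by omega : lt.length - (index + 1) ≤ fuel) (by simp)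
          (by rw [h2, pvMaxByLen_append _ _ (by simp), pvMaxByLen_append _ _ hne, hmax]
              rw [if_neg (by split <;> simp)])
          (by by_cases hq : best.length < (result ++ [lt[index]!]).length
              · rw [if_pos hq]; simp
              · rw [if_neg hq]; exact hb)
          (by simp only [Nat.add_sub_cancel]; rw [if_neg hc2])

-- one-step unfolding of the fuelled loop
theorem pvLoopA_succ (lt : List Char) (i : Nat) (r : List Char)
    (ls : List (List Char)) (f : Nat) :
    pvLoopA lt i r ls (f + 1)
      = if lt.length < 2 then lt.map (fun c => [c])
        else if i = lt.length - 1 then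
          (if lt[i - 1]! < lt[i]! then ls ++ [r ++ [lt[i]!]] else ls)
        else if lt[i]! < lt[i + 1]! then
          pvLoopA lt (i + 1) (r ++ [lt[i]!]) (ls ++ [r ++ [lt[i]!]]) f
        else pvLoopA lt (i + 1) [] (ls ++ [r ++ [lt[i]!], []]) f := rfl

-- the whole program, stated over the character list
theorem pvMain_list (l : List Char) :
    (if (pvLoopA l 0 [] [] (l.length + 1)).length = 0 then ""
     else String.ofList (pvMaxByLen (pvLoopA l 0 [] [] (l.length + 1))))
      = String.ofList (l.foldl pvStepB ([], [], none)).1 := by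
  match l with
  | [] => rfl
  | [c] => rfl
  | a :: b :: rest =>
    have hn : 2 ≤ (a :: b :: rest).length := by simp
    rw [pvLoopA_succ]
    have hg0 : (a :: b :: rest)[0]! = a := rfl
    have hg1 : (a :: b :: rest)[0 + 1]! = b := rfl
    rw [if_neg (by simp : ¬ (a :: b :: rest).length < 2),
        if_neg (by simp : ¬ (0 : Nat) = (a :: b :: rest).length - 1), hg0, hg1]
    rw [List.foldl_cons]
    have hstep0 : pvStepB ([], [], none) a = ([a], [a], some a) := rfl
    rw [hstep0]
    simp only [List.nil_append]
    have hdrop1 : (a :: b :: rest).drop 1 = b :: rest := rfl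
    have hga : (a :: b :: rest)[1 - 1]! = a := rfl
    by_cases hab : a < b
    · rw [if_pos hab]
      have hinv := pvLoop_inv (a :: b :: rest) ((a :: b :: rest).length) 1
        [a] [a] [a] [[a]]
        hn (by omega) (by simp) (by simp) (by simp)
        (by rfl) (by simp)
        (by rw [hga, hg1, if_pos hab])
      rw [if_neg (by simpa using hinv.2), hinv.1, hga, hdrop1]
    · rw [if_neg hab]
      have hinv := pvLoop_inv (a :: b :: rest) ((a :: b :: rest).length) 1
        [] [a] [a] [[a], []]
        hn (by omega) (by simp) (by simp) (by simp)
        (by rfl) (by simp)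
        (by rw [hga, hg1, if_neg hab])
      rw [if_neg (by simpa using hinv.2), hinv.1, hga, hdrop1]

-- ===== VERDICT (by name: the statement is the Claim_ definition above) =====
theorem longest_substring_in_order_spec : Claim_equal_longest_substring_in_order := by
  intro s _
  exact pvMain_list s.toList
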